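-- pv_equiv track=rewrite | github.com/ZhiruiYe/evo_probe | src/find_contact.py | find_alignment_start
-- ===== SOURCE A (Python) =====
-- def find_alignment_start(pdb_sequence: str, msa_sequence: str, min_match_length: int = 5) -> int:
--     """
--     自动寻找PDB序列在MSA序列中的对齐起始位置 - 细菌式基因
--
--     Args:
--         pdb_sequence: PDB序列
--         msa_sequence: 清理后的MSA序列
--         min_match_length: 最小连续匹配长度
--
--     Returns:
--         PDB序列的起始偏移量
--     """
--     # 移除MSA中的gap，得到纯氨基酸序列
--     msa_no_gaps = msa_sequence.replace('-', '')
--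
--     best_offset = 0
--     best_match_count = 0
--
--     # 尝试不同的PDB起始位置
--     for pdb_offset in range(len(pdb_sequence)):
--         match_count = 0
--         consecutive_matches = 0
--         max_consecutive = 0
--
--         # 比较从该偏移量开始的序列
--         for i in range(min(len(pdb_sequence) - pdb_offset, len(msa_no_gaps))):
--             if pdb_sequence[pdb_offset + i].upper() == msa_no_gaps[i].upper():
--                 match_count += 1
--                 consecutive_matches += 1
--                 max_consecutive = max(max_consecutive, consecutive_matches)
--             else:
--                 consecutive_matches = 0
--
--         # 如果找到足够长的连续匹配，且总匹配数更多
--         if max_consecutive >= min_match_length and match_count > best_match_count: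
--             best_match_count = match_count
--             best_offset = pdb_offset
--
--     return best_offset
-- ===== SOURCE B (Python) =====
-- def find_alignment_start(pdb_sequence: str, msa_sequence: str, min_match_length: int = 5) -> int:
--     """Declarative restatement: an offset qualifies iff some window of
--     min_match_length consecutive positions matches entirely (no run counters);
--     its score is the plain match count; the winner is picked by a single max
--     over (count, -offset) tuples, returning 0 when no qualifying offset scores."""
--     msa = msa_sequence.replace('-', '').upper()
--     pdb = pdb_sequence.upper()
--     k = min_match_length
--     scored = []
--     for off in range(len(pdb)):
--         m = min(len(pdb) - off, len(msa))
--         count = sum(pdb[off + i] == msa[i] for i in range(m))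
--         ok = k <= 0 or any(
--             all(pdb[off + j + t] == msa[j + t] for t in range(k))
--             for j in range(m - k + 1))
--         if ok:
--             scored.append((count, -off))
--     count, neg = max(scored, default=(0, 0))
--     return -neg if count > 0 else 0
-- ===== Notes on version B (the rewrite author's own statement) =====
-- stated objective: alternative
-- what changed: A keeps three running counters per offset (match_count, consecutive, max_consecutive) and stateful best-tracking; B never computes a longest run: an offset qualifies iff an existential window test (any/all) finds min_match_length consecutive matching positions, its score is a plain sum of the comparisons, and the winner is picked declaratively by one max over (count, -offset) tuples with default (0,0).
import Mathlib
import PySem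

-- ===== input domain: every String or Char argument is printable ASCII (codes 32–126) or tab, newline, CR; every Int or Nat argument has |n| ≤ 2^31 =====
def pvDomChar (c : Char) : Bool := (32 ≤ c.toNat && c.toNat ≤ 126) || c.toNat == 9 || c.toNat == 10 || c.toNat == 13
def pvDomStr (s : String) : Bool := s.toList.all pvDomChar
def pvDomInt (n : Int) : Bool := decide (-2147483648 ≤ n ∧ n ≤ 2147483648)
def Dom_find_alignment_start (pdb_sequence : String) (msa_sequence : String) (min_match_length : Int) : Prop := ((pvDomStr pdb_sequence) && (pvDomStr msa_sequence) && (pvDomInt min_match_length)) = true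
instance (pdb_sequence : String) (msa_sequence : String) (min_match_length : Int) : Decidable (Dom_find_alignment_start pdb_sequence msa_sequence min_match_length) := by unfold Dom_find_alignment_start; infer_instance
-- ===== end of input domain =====

-- B drops A's running-counter scoring and stateful best-tracking: qualification becomes an
-- existential all-matching-window test, the score a plain sum, the winner one max over
-- (count, -offset) tuples (objective: alternative decomposition, same result).

-- ===== PORT A =====
-- literal transliteration of A: outer loop over offsets, inner fused loop keeping
-- (match_count, consecutive_matches, max_consecutive); indices are always in range, so
-- getD's default is never used.
def find_alignment_start (pdb_sequence : String) (msa_sequence : String) (min_match_length : Int) : Int :=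
  let pdbL := pdb_sequence.toList
  let msa_no_gaps := PySem.Chars.replace msa_sequence.toList ['-'] []
  let res := (List.range pdbL.length).foldl (fun (best : Nat × Nat) off =>
      let inner := (List.range (min (pdbL.length - off) msa_no_gaps.length)).foldl
        (fun (st : Nat × Nat × Nat) i =>
          if PySem.Chars.upperChar (pdbL.getD (off + i) ' ')
              == PySem.Chars.upperChar (msa_no_gaps.getD i ' ')
          then (st.1 + 1, st.2.1 + 1, max st.2.2 (st.2.1 + 1))
          else (st.1, 0, st.2.2)) (0, 0, 0)
      if min_match_length ≤ (inner.2.2 : Int) ∧ best.2 < inner.1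
      then (off, inner.1) else best) (0, 0)
  (res.1 : Int)

-- ===== PORT B =====
-- literal transliteration of Source B: uppercase both strings once; per offset, score by the
-- sum of the match indicators and qualify by 'k <= 0 or any(all-matching window of k)'
-- (for k ≥ 1 Python's range(m-k+1) has m+1-k.toNat elements; the k ≤ 0 branch mirrors the
-- short-circuit 'or'); collect (count, -off) for qualifying offsets; then Python's
-- max(scored, default=(0,0)) = first lexicographic maximum, and the final guard.
-- Python's max on (count, -offset) tuples with default: keep the later element only if
-- strictly lexicographically greater (= first maximum), (0, 0) for the empty list.
def pvPick (b p : Nat × Int) : Nat × Int :=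
  if b.1 < p.1 ∨ (b.1 = p.1 ∧ b.2 < p.2) then p else b

def pvMaxD : List (Nat × Int) → Nat × Int
  | [] => (0, 0)
  | h :: t => t.foldl pvPick h

def find_alignment_start_alt (pdb_sequence : String) (msa_sequence : String) (min_match_length : Int) : Int :=
  let msa := PySem.Chars.upper (PySem.Chars.replace msa_sequence.toList ['-'] [])
  let pdb := PySem.Chars.upper pdb_sequence.toList
  let k := min_match_length
  let scored := (List.range pdb.length).foldl (fun (acc : List (Nat × Int)) off =>
      let m := min (pdb.length - off) msa.length
      let count := ((List.range m).map
        (fun i => if pdb.getD (off + i) ' ' == msa.getD i ' ' then (1 : Nat) else 0)).sum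
      let ok := if k ≤ 0 then true else
        (List.range (m + 1 - k.toNat)).any (fun j =>
          (List.range k.toNat).all (fun t => pdb.getD (off + j + t) ' ' == msa.getD (j + t) ' '))
      if ok then acc ++ [(count, -(off : Int))] else acc) []
  let best := pvMaxD scored
  if 0 < best.1 then -best.2 else 0

-- ===== PRECONDITION & SPEC =====
def Spec_find_alignment_start (pdb_sequence : String) (msa_sequence : String) (min_match_length : Int) (out : Int) : Prop := out = find_alignment_start_alt pdb_sequence msa_sequence min_match_length
instance (pdb_sequence : String) (msa_sequence : String) (min_match_length : Int) (out : Int) : Decidable (Spec_find_alignment_start pdb_sequence msa_sequence min_match_length out) := by unfold Spec_find_alignment_start; infer_instance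

-- ===== CLAIM (what is proved, stated in full; the proofs are below) =====
def Claim_equal_find_alignment_start : Prop := ∀ (pdb_sequence : String) (msa_sequence : String) (min_match_length : Int), Dom_find_alignment_start pdb_sequence msa_sequence min_match_length → Spec_find_alignment_start pdb_sequence msa_sequence min_match_length (find_alignment_start pdb_sequence msa_sequence min_match_length)

-- ===== LEMMAS AND PROOFS =====

-- longest run of `true`s when the current run already has length `cur`
def pvLongestFrom : Nat → List Bool → Nat
  | cur, [] => cur
  | cur, true :: t => pvLongestFrom (cur + 1) t
  | cur, false :: t => max cur (pvLongestFrom 0 t)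

theorem pvLongestFrom_ge (bs : List Bool) (cur : Nat) : cur ≤ pvLongestFrom cur bs := by
  induction bs generalizing cur with
  | nil => simp [pvLongestFrom]
  | cons b t ih =>
    cases b
    · simp [pvLongestFrom]
    · exact le_trans (Nat.le_succ cur) (ih (cur + 1))

theorem pvLongestFrom_mono (bs : List Bool) {c c' : Nat} (h : c ≤ c') :
    pvLongestFrom c bs ≤ pvLongestFrom c' bs := by
  induction bs generalizing c c' with
  | nil => simpa [pvLongestFrom]
  | cons b t ih =>
    cases b
    · simp only [pvLongestFrom]; exact max_le_max h le_rfl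
    · exact ih (by omega)

-- a prefix of p matches entirely → the run from cur reaches cur + p
theorem pvLead (p : Nat) : ∀ (bs : List Bool) (cur : Nat), p ≤ bs.length →
    (∀ t < p, bs.getD t false = true) → cur + p ≤ pvLongestFrom cur bs := by
  induction p with
  | zero => intro bs cur _ _; simpa using pvLongestFrom_ge bs cur
  | succ p ih =>
    intro bs cur hlen hall
    match bs with
    | [] => simp at hlen
    | b :: t =>
      have hb : b = true := hall 0 (by omega)
      subst hb
      simp only [pvLongestFrom]
      have := ih t (cur + 1) (by simpa using hlen)
        (fun s hs => by simpa using hall (s + 1) (by omega))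
      omega

-- a fully matching window of length k anywhere → longest run ≥ k
theorem pvWindow_le (k : Nat) : ∀ (j : Nat) (bs : List Bool) (cur : Nat),
    j + k ≤ bs.length → (∀ t < k, bs.getD (j + t) false = true) →
    k ≤ pvLongestFrom cur bs := by
  intro j
  induction j with
  | zero =>
    intro bs cur hlen hall
    have := pvLead k bs cur (by omega) (fun t ht => by simpa using hall t ht)
    omega
  | succ j ih =>
    intro bs cur hlen hall
    match bs with
    | [] => match k with
      | 0 => omega
      | k + 1 => simp at hlen
    | b :: t =>
      have h1 : k ≤ pvLongestFrom 0 t :=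
        ih t 0 (by simp only [List.length_cons] at hlen; omega)
          (fun s hs => by simpa [Nat.succ_add] using hall s hs)
      cases b
      · simp only [pvLongestFrom]; omega
      · simp only [pvLongestFrom]
        exact h1.trans (pvLongestFrom_mono t (Nat.zero_le _))

-- longest run ≥ k → a run reaching through the front, or a window inside
theorem pvLong_split (k : Nat) : ∀ (bs : List Bool) (cur : Nat), k ≤ pvLongestFrom cur bs →
    (∃ p, p ≤ bs.length ∧ (∀ t < p, bs.getD t false = true) ∧ k ≤ cur + p) ∨
    (∃ j, j + k ≤ bs.length ∧ ∀ t < k, bs.getD (j + t) false = true) := by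
  intro bs
  induction bs with
  | nil =>
    intro cur h
    exact Or.inl ⟨0, by simp, by simp, by
      simpa [pvLongestFrom] using h⟩
  | cons b t ih =>
    intro cur h
    cases b
    · simp only [pvLongestFrom] at h
      by_cases hc : k ≤ cur
      · exact Or.inl ⟨0, by simp, by simp, by omega⟩
      · have h2 : k ≤ pvLongestFrom 0 t := by
          rcases le_max_iff.mp h with h' | h'
          · exact absurd h' hc
          · exact h'
        rcases ih 0 h2 with ⟨p, hp, hall, hk⟩ | ⟨j, hj, hall⟩
        · refine Or.inr ⟨1, by simp only [List.length_cons]; omega, fun s hs => ?_⟩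
          have hsp : s < p := by omega
          simpa [Nat.add_comm 1 s] using hall s hsp
        · refine Or.inr ⟨j + 1, by simp only [List.length_cons]; omega, fun s hs => ?_⟩
          have := hall s hs
          simpa [Nat.succ_add, Nat.add_right_comm] using this
    · simp only [pvLongestFrom] at h
      rcases ih (cur + 1) h with ⟨p, hp, hall, hk⟩ | ⟨j, hj, hall⟩
      · refine Or.inl ⟨p + 1, by simpa using hp, fun s hs => ?_, by omega⟩
        match s with
        | 0 => simp
        | s + 1 => simpa using hall s (by omega)
      · refine Or.inr ⟨j + 1, by simp only [List.length_cons]; omega, fun s hs => ?_⟩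
        simpa [Nat.succ_add] using hall s hs

-- the characterization B uses: longest run ≥ k ↔ some window of k consecutive trues
theorem pvRunIff (k : Nat) (bs : List Bool) :
    k ≤ pvLongestFrom 0 bs ↔ ∃ j, j + k ≤ bs.length ∧ ∀ t < k, bs.getD (j + t) false = true := by
  constructor
  · intro h
    rcases pvLong_split k bs 0 h with ⟨p, hp, hall, hk⟩ | w
    · exact ⟨0, by omega, fun t ht => by simpa using hall t (by omega)⟩
    · exact w
  · rintro ⟨j, hj, hall⟩
    exact pvWindow_le k j bs 0 hj hall

-- A's fused inner loop on a bit list computes (count of true, _, max of old max and longest run)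
theorem pvFused (bs : List Bool) (mc cur mx : Nat) (h : cur ≤ mx) :
    (bs.foldl (fun (st : Nat × Nat × Nat) b =>
        if b then (st.1 + 1, st.2.1 + 1, max st.2.2 (st.2.1 + 1)) else (st.1, 0, st.2.2))
        (mc, cur, mx)).1 = mc + bs.count true ∧
    (bs.foldl (fun (st : Nat × Nat × Nat) b =>
        if b then (st.1 + 1, st.2.1 + 1, max st.2.2 (st.2.1 + 1)) else (st.1, 0, st.2.2))
        (mc, cur, mx)).2.2 = max mx (pvLongestFrom cur bs) := by
  induction bs generalizing mc cur mx with
  | nil => simp [pvLongestFrom]; omega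
  | cons b t ih =>
    cases b
    · simp only [List.foldl_cons, pvLongestFrom]
      rw [if_neg (by decide : ¬ (false = true))]
      obtain ⟨h1, h2⟩ := ih mc 0 mx (Nat.zero_le _)
      refine ⟨by simpa using h1, ?_⟩
      rw [h2]
      omega
    · simp only [List.foldl_cons, pvLongestFrom]
      rw [if_pos trivial]
      obtain ⟨h1, h2⟩ := ih (mc + 1) (cur + 1) (max mx (cur + 1)) (le_max_right _ _)
      refine ⟨by simpa [Nat.add_comm, Nat.add_assoc, Nat.add_left_comm] using h1, ?_⟩
      rw [h2]
      have := pvLongestFrom_ge t (cur + 1)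
      omega

theorem pvMaxD_append (s : List (Nat × Int)) (x : Nat × Int) (h : s ≠ []) :
    pvMaxD (s ++ [x]) = pvPick (pvMaxD s) x := by
  match s with
  | [] => exact absurd rfl h
  | a :: t => simp [pvMaxD, List.foldl_append]

theorem pvFoldPick_fst_zero (t : List (Nat × Int)) :
    ∀ b : Nat × Int, b.1 = 0 → (∀ p ∈ t, p.1 = 0) → (t.foldl pvPick b).1 = 0 := by
  induction t with
  | nil => intro b hb _; simpa using hb
  | cons a t ih =>
    intro b hb hall
    simp only [List.foldl_cons]
    refine ih _ ?_ (fun p hp => hall p (by simp [hp]))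
    have ha : a.1 = 0 := hall a (by simp)
    unfold pvPick
    split <;> simp [ha, hb]

theorem pvMaxD_fst_zero (s : List (Nat × Int)) (h : ∀ p ∈ s, p.1 = 0) :
    (pvMaxD s).1 = 0 := by
  match s with
  | [] => rfl
  | a :: t =>
    exact pvFoldPick_fst_zero t a (h a (by simp)) (fun p hp => h p (by simp [hp]))

theorem pvMaxD_append_pos (s : List (Nat × Int)) (x : Nat × Int)
    (h : ∀ p ∈ s, p.1 = 0) (hx : 0 < x.1) : pvMaxD (s ++ [x]) = x := by
  match s with
  | [] => rfl
  | a :: t =>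
    rw [pvMaxD_append _ _ (by simp)]
    have := pvMaxD_fst_zero (a :: t) h
    unfold pvPick
    rw [if_pos (Or.inl (by omega))]

-- the outer correspondence: A's stateful best-tracking fold versus B's collect-then-max,
-- for any score c, qualification q and strictly increasing offset list
theorem pvOuter (c : Nat → Nat) (q : Nat → Bool) :
    ∀ (L : List Nat) (bo bc : Nat) (s : List (Nat × Int)),
      L.Pairwise (· < ·) →
      (bc = 0 → bo = 0 ∧ ∀ p ∈ s, p.1 = 0) →
      (0 < bc → pvMaxD s = (bc, -(bo : Int)) ∧ s ≠ [] ∧ ∀ o ∈ L, bo < o) →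
      (if 0 < (pvMaxD (L.foldl (fun acc off =>
          if q off then acc ++ [(c off, -(off : Int))] else acc) s)).1
       then -(pvMaxD (L.foldl (fun acc off =>
          if q off then acc ++ [(c off, -(off : Int))] else acc) s)).2 else 0)
      = ((L.foldl (fun (st : Nat × Nat) off =>
          if q off = true ∧ st.2 < c off then (off, c off) else st) (bo, bc)).1 : Int) := by
  intro L
  induction L with
  | nil =>
    intro bo bc s _ h0 hpos
    simp only [List.foldl_nil]
    rcases Nat.eq_zero_or_pos bc with hbc | hbc
    · obtain ⟨hbo, hall⟩ := h0 hbc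
      rw [if_neg (by simp [pvMaxD_fst_zero s hall]), hbo]
      simp
    · obtain ⟨hmax, _, _⟩ := hpos hbc
      rw [hmax]
      simp [hbc]
  | cons off L ih =>
    intro bo bc s hpw h0 hpos
    have hpwL : L.Pairwise (· < ·) := hpw.sublist (List.sublist_cons_self _ _)
    have hoffL : ∀ o ∈ L, off < o := fun o ho => (List.pairwise_cons.mp hpw).1 o ho
    simp only [List.foldl_cons]
    by_cases hq : q off = true
    · rw [if_pos hq]
      by_cases hlt : bc < c off
      · rw [if_pos (show q off = true ∧ (bo, bc).2 < c off from ⟨hq, hlt⟩)]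
        have hnewmax : pvMaxD (s ++ [(c off, -(off : Int))]) = (c off, -(off : Int)) := by
          rcases Nat.eq_zero_or_pos bc with hbc | hbc
          · exact pvMaxD_append_pos s _ (h0 hbc).2 (by simp only; omega)
          · obtain ⟨hmax, hne, _⟩ := hpos hbc
            rw [pvMaxD_append s _ hne, hmax]
            unfold pvPick
            rw [if_pos (Or.inl (by simpa using hlt))]
        refine ih off (c off) (s ++ [(c off, -(off : Int))]) hpwL
          (fun hz => absurd hz (by omega)) (fun _ => ?_)
        exact ⟨hnewmax, by simp, hoffL⟩
      · rw [if_neg (show ¬ (q off = true ∧ (bo, bc).2 < c off) from fun hco => hlt hco.2)]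
        refine ih bo bc (s ++ [(c off, -(off : Int))]) hpwL (fun hz => ?_) (fun hbc => ?_)
        · obtain ⟨hbo, hall⟩ := h0 hz
          refine ⟨hbo, fun p hp => ?_⟩
          rcases List.mem_append.mp hp with hp | hp
          · exact hall p hp
          · have : p = (c off, -(off : Int)) := by simpa using hp
            subst this
            simp only
            omega
        · obtain ⟨hmax, hne, hbo⟩ := hpos hbc
          have hbooff : bo < off := hbo off (by simp)
          refine ⟨?_, by simp, fun o ho => hbo o (by simp [ho])⟩
          rw [pvMaxD_append s _ hne, hmax]
          unfold pvPick
          rw [if_neg ?_]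
          simp only [not_or, not_and, not_lt]
          exact ⟨by omega, fun _ => by omega⟩
    · rw [if_neg hq, if_neg (show ¬ (q off = true ∧ (bo, bc).2 < c off) from fun hco => hq hco.1)]
      exact ih bo bc s hpwL h0
        (fun hbc => ⟨(hpos hbc).1, (hpos hbc).2.1, fun o ho => (hpos hbc).2.2 o (by simp [ho])⟩)

theorem pvUpper_eq_map (l : List Char) : PySem.Chars.upper l = l.map PySem.Chars.upperChar := rfl

theorem pvCount_bits (l : List Nat) (f : Nat → Bool) :
    List.count true (l.map f) = l.countP f := by
  simp only [List.count_eq_countP, List.countP_map, Function.comp_def, beq_true]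

theorem find_alignment_start_eq_alt (pdb_sequence msa_sequence : String) (min_match_length : Int) :
    find_alignment_start pdb_sequence msa_sequence min_match_length
      = find_alignment_start_alt pdb_sequence msa_sequence min_match_length := by
  unfold find_alignment_start find_alignment_start_alt
  simp only [pvUpper_eq_map, List.length_map]
  set pdbL := pdb_sequence.toList with hpdb
  set msaL := PySem.Chars.replace msa_sequence.toList ['-'] [] with hmsa
  set k := min_match_length with hk
  have key := pvOuter
    (fun off => ((List.range (min (pdbL.length - off) msaL.length)).map
      (fun i => if (pdbL.map PySem.Chars.upperChar).getD (off + i) ' '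
          == (msaL.map PySem.Chars.upperChar).getD i ' ' then (1 : Nat) else 0)).sum)
    (fun off => if k ≤ 0 then true else
      (List.range (min (pdbL.length - off) msaL.length + 1 - k.toNat)).any (fun j =>
        (List.range k.toNat).all (fun t => (pdbL.map PySem.Chars.upperChar).getD (off + j + t) ' '
          == (msaL.map PySem.Chars.upperChar).getD (j + t) ' ')))
    (List.range pdbL.length) 0 0 [] List.pairwise_lt_range
    (fun _ => ⟨rfl, by simp⟩) (fun h => absurd h (by omega))
  beta_reduce at key
  refine Eq.trans ?_ key.symm
  congr 1
  congr 1
  apply PySem.List.foldl_congr_mem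
  intro st off hoff
  simp only [List.mem_range] at hoff
  -- the per-offset bit list both sides score
  set m := min (pdbL.length - off) msaL.length with hm
  set bs := (List.range m).map
    (fun i => (pdbL.map PySem.Chars.upperChar).getD (off + i) ' '
      == (msaL.map PySem.Chars.upperChar).getD i ' ') with hbs
  -- pointwise: A's per-character uppercase comparison is the bit list entry
  have hpt : ∀ i < m,
      (PySem.Chars.upperChar (pdbL.getD (off + i) ' ')
        == PySem.Chars.upperChar (msaL.getD i ' '))
      = ((pdbL.map PySem.Chars.upperChar).getD (off + i) ' '
        == (msaL.map PySem.Chars.upperChar).getD i ' ') := by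
    intro i hi
    have hi1 : i < msaL.length := lt_of_lt_of_le hi (min_le_right _ _)
    have hi2 : off + i < pdbL.length := by
      have := lt_of_lt_of_le hi (min_le_left _ _)
      omega
    have e1 : (pdbL.map PySem.Chars.upperChar).getD (off + i) ' '
        = PySem.Chars.upperChar pdbL[off + i] := by
      rw [List.getD_eq_getElem _ _ (by simpa using hi2), List.getElem_map]
    have e2 : (msaL.map PySem.Chars.upperChar).getD i ' '
        = PySem.Chars.upperChar msaL[i] := by
      rw [List.getD_eq_getElem _ _ (by simpa using hi1), List.getElem_map]
    rw [List.getD_eq_getElem _ _ hi2, List.getD_eq_getElem _ _ hi1, e1, e2]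
  -- A's fused inner loop is the fused fold over the bit list
  have hinner : (List.range m).foldl
      (fun (st : Nat × Nat × Nat) i =>
        if PySem.Chars.upperChar (pdbL.getD (off + i) ' ')
            == PySem.Chars.upperChar (msaL.getD i ' ')
        then (st.1 + 1, st.2.1 + 1, max st.2.2 (st.2.1 + 1))
        else (st.1, 0, st.2.2)) (0, 0, 0)
      = bs.foldl (fun (st : Nat × Nat × Nat) b =>
        if b then (st.1 + 1, st.2.1 + 1, max st.2.2 (st.2.1 + 1))
        else (st.1, 0, st.2.2)) (0, 0, 0) := by
    rw [hbs, List.foldl_map]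
    apply PySem.List.foldl_congr_mem
    intro a i hi
    rw [hpt i (List.mem_range.mp hi)]
  obtain ⟨h1, h2⟩ := pvFused bs 0 0 0 le_rfl
  -- the match count equals B's indicator sum
  have hcount : bs.count true
      = ((List.range m).map
        (fun i => if (pdbL.map PySem.Chars.upperChar).getD (off + i) ' '
            == (msaL.map PySem.Chars.upperChar).getD i ' ' then (1 : Nat) else 0)).sum := by
    rw [PySem.List.sum_map_ite_one_zero_nat, hbs, pvCount_bits]
  -- qualification: longest run ≥ k iff B's existential window test
  have hq : (k ≤ ((pvLongestFrom 0 bs : Nat) : Int))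
      = ((if k ≤ 0 then true else
        (List.range (m + 1 - k.toNat)).any (fun j =>
          (List.range k.toNat).all (fun t => (pdbL.map PySem.Chars.upperChar).getD (off + j + t) ' '
            == (msaL.map PySem.Chars.upperChar).getD (j + t) ' '))) = true) := by
    have hlen : bs.length = m := by simp [hbs]
    have hbridge : ∀ j t : Nat, j + t < m →
        bs.getD (j + t) false
        = ((pdbL.map PySem.Chars.upperChar).getD (off + j + t) ' '
          == (msaL.map PySem.Chars.upperChar).getD (j + t) ' ') := by
      intro j t hjt
      have hidx : j + t < bs.length := by rw [hlen]; exact hjt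
      rw [List.getD_eq_getElem bs false hidx]
      simp only [hbs]
      rw [List.getElem_map, List.getElem_range, ← Nat.add_assoc]
    by_cases hk0 : k ≤ 0
    · simp only [if_pos hk0]
      apply propext
      constructor
      · intro _; trivial
      · intro _; exact le_trans hk0 (by positivity)
    · rw [if_neg hk0]
      have hcast : (k ≤ ((pvLongestFrom 0 bs : Nat) : Int)) ↔ k.toNat ≤ pvLongestFrom 0 bs :=
        Int.toNat_le.symm
      apply propext
      rw [hcast, pvRunIff]
      constructor
      · rintro ⟨j, hj, hall⟩
        rw [hlen] at hj
        rw [List.any_eq_true]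
        refine ⟨j, List.mem_range.mpr (by omega), ?_⟩
        rw [List.all_eq_true]
        intro t ht
        rw [List.mem_range] at ht
        have := hall t ht
        rw [hbridge j t (by omega)] at this
        exact this
      · intro hany
        rw [List.any_eq_true] at hany
        obtain ⟨j, hjmem, hall⟩ := hany
        rw [List.mem_range] at hjmem
        rw [List.all_eq_true] at hall
        refine ⟨j, by rw [hlen]; omega, fun t ht => ?_⟩
        have := hall t (List.mem_range.mpr ht)
        rw [hbridge j t (by omega)]
        exact this
  -- assemble the per-offset step equality
  simp only [hinner, h1, h2, Nat.zero_add, Nat.zero_max, hcount, hq]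

-- ===== VERDICT (by name: the statement is the Claim_ definition above) =====
theorem find_alignment_start_spec : Claim_equal_find_alignment_start := by
  intro pdb msa mml _
  exact find_alignment_start_eq_alt pdb msa mml
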